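-- pv_equiv track=rewrite | github.com/Nishant07singh857/ai-interview-platform | backend/app/ml_services/gap_analyzer.py | _categorize_gaps
-- ===== SOURCE A (Python) =====
-- from typing import Dict, List, Any, Optional
--
-- def _categorize_gaps(skill_gaps: List[Dict]) -> tuple:
--     """Categorize gaps by priority"""
--
--     high = []
--     medium = []
--     low = []
--
--     for gap in skill_gaps:
--         if gap["severity"] == "high":
--             high.append(gap)
--         elif gap["severity"] == "medium":
--             medium.append(gap)
--         else:
--             low.append(gap)
--
--     return high, medium, low
-- ===== SOURCE B (Python) =====
-- def _categorize_gaps(skill_gaps):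
--     """Categorize gaps by priority: stable-sort by severity rank, then slice
--     the sorted list at the bucket boundaries given by the rank counts."""
--     rank = {"high": 0, "medium": 1}
--     ranks = [rank.get(g["severity"], 2) for g in skill_gaps]
--     order = sorted(skill_gaps, key=lambda g: rank.get(g["severity"], 2))
--     nh = ranks.count(0)
--     nm = ranks.count(1)
--     return order[:nh], order[nh:nh + nm], order[nh + nm:]
-- ===== Notes on version B (the rewrite author's own statement) =====
-- stated objective: alternative
-- what changed: A's single branching loop with three accumulators is replaced by a stable sort of the gaps by a numeric severity rank (high=0, medium=1, other=2) followed by slicing the sorted list at the two bucket boundaries computed from the rank counts; stability of the sort preserves A's per-bucket order.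
import Mathlib
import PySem

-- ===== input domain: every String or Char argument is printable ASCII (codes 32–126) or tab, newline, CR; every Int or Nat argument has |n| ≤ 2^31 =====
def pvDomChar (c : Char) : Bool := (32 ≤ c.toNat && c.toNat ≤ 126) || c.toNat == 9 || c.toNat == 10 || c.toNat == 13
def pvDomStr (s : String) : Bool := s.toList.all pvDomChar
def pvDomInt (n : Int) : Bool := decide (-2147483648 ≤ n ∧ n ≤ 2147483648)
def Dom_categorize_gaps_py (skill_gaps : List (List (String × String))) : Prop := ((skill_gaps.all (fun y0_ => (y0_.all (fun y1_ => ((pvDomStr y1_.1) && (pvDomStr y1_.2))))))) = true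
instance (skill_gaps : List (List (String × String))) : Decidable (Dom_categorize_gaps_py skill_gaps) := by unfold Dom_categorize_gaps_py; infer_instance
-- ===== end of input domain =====

-- B replaces A's single branching loop by a stable sort on a numeric severity rank followed by
-- slicing at the bucket boundaries (same return value; "alternative", not faster).

-- ===== PORT A =====
-- gap["severity"]: first match in the association list; "" is never read under Pre_ (the key is present).
def pvSeverity (gap : List (String × String)) : String :=
  ((gap.lookup "severity").getD "")

-- A's loop: one pass, three accumulators, branch per element.
def categorize_gaps_py (skill_gaps : List (List (String × String))) : (List (List (String × String))) × (List (List (String × String))) × (List (List (String × String))) :=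
  let r := skill_gaps.foldl
    (fun (acc : (List (List (String × String))) × (List (List (String × String))) × (List (List (String × String)))) gap =>
      if pvSeverity gap = "high" then (acc.1 ++ [gap], acc.2.1, acc.2.2)
      else if pvSeverity gap = "medium" then (acc.1, acc.2.1 ++ [gap], acc.2.2)
      else (acc.1, acc.2.1, acc.2.2 ++ [gap]))
    ([], [], [])
  r

-- ===== PORT B =====
-- rank.get(g["severity"], 2) on the literal dict {"high": 0, "medium": 1}.
def pvRank (gap : List (String × String)) : Int :=
  PySem.Dict.getD (PySem.Dict.ofList [(("high" : String), (0 : Int)), ("medium", 1)]) (pvSeverity gap) 2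

-- B: stable sort by rank, then slice at the boundaries given by the rank counts.
def categorize_gaps_py_alt (skill_gaps : List (List (String × String))) : (List (List (String × String))) × (List (List (String × String))) × (List (List (String × String))) :=
  let ranks := skill_gaps.map pvRank
  let order := PySem.List.sorted skill_gaps (fun g => pvRank g) false
  let nh : Int := (PySem.List.count ranks 0 : Nat)
  let nm : Int := (PySem.List.count ranks 1 : Nat)
  (PySem.List.slice order none (some nh),
   PySem.List.slice order (some nh) (some (nh + nm)),
   PySem.List.slice order (some (nh + nm)) none)

-- ===== PRECONDITION & SPEC =====
-- Pre_ excludes exactly the inputs where gap["severity"] raises KeyError (in A and in B alike): some gap has no "severity" key.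
def Pre_categorize_gaps_py (skill_gaps : List (List (String × String))) : Prop :=
  ∀ gap ∈ skill_gaps, (gap.any (fun p => p.1 == "severity")) = true
instance (skill_gaps : List (List (String × String))) : Decidable (Pre_categorize_gaps_py skill_gaps) := by unfold Pre_categorize_gaps_py; infer_instance

def pvWitness_categorize_gaps_py : (List (List (String × String))) :=
  [[("severity", "high"), ("skill", "sql")], [("severity", "odd")]]

def Spec_categorize_gaps_py (skill_gaps : List (List (String × String))) (out : (List (List (String × String))) × (List (List (String × String))) × (List (List (String × String)))) : Prop := out = categorize_gaps_py_alt skill_gaps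
instance (skill_gaps : List (List (String × String))) (out : (List (List (String × String))) × (List (List (String × String))) × (List (List (String × String)))) : Decidable (Spec_categorize_gaps_py skill_gaps out) := by unfold Spec_categorize_gaps_py; infer_instance

-- ===== CLAIM (what is proved, stated in full; the proofs are below) =====
def Claim_equal_categorize_gaps_py : Prop := ∀ (skill_gaps : List (List (String × String))), Dom_categorize_gaps_py skill_gaps → Pre_categorize_gaps_py skill_gaps → Spec_categorize_gaps_py skill_gaps (categorize_gaps_py skill_gaps)

-- ===== LEMMAS AND PROOFS =====

-- The rank of a gap, by cases on its severity string.
theorem pvRank_eq (g : List (String × String)) :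
    pvRank g = if pvSeverity g = "high" then (0 : Int) else if pvSeverity g = "medium" then 1 else 2 := by
  have hi : pvRank g
      = (Option.map (fun x : String × Int => x.2)
          (List.find? (fun p => p.1 == pvSeverity g) [(("high" : String), (0 : Int)), ("medium", 1)])).getD 2 := rfl
  rw [hi]
  by_cases h1 : pvSeverity g = "high"
  · simp [h1]
  · have b1 : ("high" == pvSeverity g) = false := beq_eq_false_iff_ne.mpr (Ne.symm h1)
    by_cases h2 : pvSeverity g = "medium"
    · simp [List.find?, h2]
    · have b2 : ("medium" == pvSeverity g) = false := beq_eq_false_iff_ne.mpr (Ne.symm h2)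
      simp [List.find?, b1, b2, h1, h2]

theorem pvRank_tri (g : List (String × String)) :
    pvRank g = 0 ∨ pvRank g = 1 ∨ pvRank g = 2 := by
  rw [pvRank_eq]; split_ifs <;> simp

-- Invariant of A's loop: the three accumulators each grow by the corresponding filter.
theorem categorize_foldl_inv (l : List (List (String × String)))
    (h m lo : List (List (String × String))) :
    l.foldl
      (fun (acc : (List (List (String × String))) × (List (List (String × String))) × (List (List (String × String)))) gap =>
        if pvSeverity gap = "high" then (acc.1 ++ [gap], acc.2.1, acc.2.2)
        else if pvSeverity gap = "medium" then (acc.1, acc.2.1 ++ [gap], acc.2.2)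
        else (acc.1, acc.2.1, acc.2.2 ++ [gap]))
      (h, m, lo)
    = (h ++ l.filter (fun gap => pvRank gap = 0),
       m ++ l.filter (fun gap => pvRank gap = 1),
       lo ++ l.filter (fun gap => pvRank gap = 2)) := by
  induction l generalizing h m lo with
  | nil => simp
  | cons g t ih =>
    by_cases hh : pvSeverity g = "high"
    · simp [List.foldl_cons, hh, ih, pvRank_eq]
    · by_cases hm : pvSeverity g = "medium"
      · simp [List.foldl_cons, hm, ih, pvRank_eq]
      · simp [List.foldl_cons, hh, hm, ih, pvRank_eq]

-- insertBy walks past a prefix none of whose elements the new element goes before,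
-- and stops right at a suffix all of whose elements it goes before.
theorem insertBy_mid {α : Type} (b : α → α → Bool) (x : α) (l1 l2 : List α)
    (h1 : ∀ y ∈ l1, b x y = false) (h2 : ∀ y ∈ l2, b x y = true) :
    PySem.List.insertBy b x (l1 ++ l2) = l1 ++ x :: l2 := by
  induction l1 with
  | nil =>
    cases l2 with
    | nil => simp [PySem.List.insertBy]
    | cons z t => simp [PySem.List.insertBy, h2 z (by simp)]
  | cons z t ih =>
    simp only [List.cons_append, PySem.List.insertBy, h1 z (by simp)]
    simp only [Bool.false_eq_true, if_false]
    rw [ih (fun y hy => h1 y (by simp [hy]))]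

theorem insertBy_last {α : Type} (b : α → α → Bool) (x : α) (l : List α)
    (h1 : ∀ y ∈ l, b x y = false) :
    PySem.List.insertBy b x l = l ++ [x] := by
  have := insertBy_mid b x l [] h1 (by simp)
  simpa using this

theorem mem_filter_rank {i : Int} {y : List (String × String)} {t : List (List (String × String))}
    (h : y ∈ t.filter (fun gap => pvRank gap = i)) : pvRank y = i := by
  have := (List.mem_filter.mp h).2
  simpa using this

-- Stable sort by rank = the three rank-filters concatenated in rank order.
theorem sorted_rank_eq (l : List (List (String × String))) :
    PySem.List.sorted l (fun g => pvRank g) false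
      = l.filter (fun gap => pvRank gap = 0)
        ++ l.filter (fun gap => pvRank gap = 1)
        ++ l.filter (fun gap => pvRank gap = 2) := by
  rw [PySem.List.sorted_eq_foldl_insertBy]
  induction l using List.reverseRecOn with
  | nil => simp
  | append_singleton t x ih =>
    rw [List.foldl_append, List.foldl_cons, List.foldl_nil, ih]
    rcases pvRank_tri x with h | h | h
    · have e := insertBy_mid (fun a b => decide (pvRank a < pvRank b)) x
        (t.filter (fun gap => pvRank gap = 0))
        ((t.filter (fun gap => pvRank gap = 1)) ++ (t.filter (fun gap => pvRank gap = 2)))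
        (by intro y hy; have := mem_filter_rank hy; simp [h, this])
        (by intro y hy
            rcases List.mem_append.mp hy with hy | hy
            · have := mem_filter_rank hy; simp [h, this]
            · have := mem_filter_rank hy; simp [h, this])
      rw [List.append_assoc, e]
      simp [List.filter_append, h]
    · have e := insertBy_mid (fun a b => decide (pvRank a < pvRank b)) x
        ((t.filter (fun gap => pvRank gap = 0)) ++ (t.filter (fun gap => pvRank gap = 1)))
        (t.filter (fun gap => pvRank gap = 2))
        (by intro y hy
            rcases List.mem_append.mp hy with hy | hy
            · have := mem_filter_rank hy; simp [h, this]
            · have := mem_filter_rank hy; simp [h, this])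
        (by intro y hy; have := mem_filter_rank hy; simp [h, this])
      rw [e]
      simp [List.filter_append, h]
    · have e := insertBy_last (fun a b => decide (pvRank a < pvRank b)) x
        ((t.filter (fun gap => pvRank gap = 0)) ++ ((t.filter (fun gap => pvRank gap = 1)) ++ (t.filter (fun gap => pvRank gap = 2))))
        (by intro y hy
            rcases List.mem_append.mp hy with hy | hy
            · have := mem_filter_rank hy; simp [h, this]
            · rcases List.mem_append.mp hy with hy | hy
              · have := mem_filter_rank hy; simp [h, this]
              · have := mem_filter_rank hy; simp [h, this])
      rw [List.append_assoc, e]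
      simp [List.filter_append, h]

-- The count of rank i among the mapped ranks is the length of the i-filter.
theorem count_rank (l : List (List (String × String))) (i : Int) :
    PySem.List.count (l.map pvRank) i = (l.filter (fun gap => pvRank gap = i)).length := by
  rw [PySem.List.count_eq]
  induction l with
  | nil => simp
  | cons g t ih =>
    by_cases hg : pvRank g = i <;> simp [hg, ih]

-- ===== VERDICT (by name: the statement is the Claim_ definition above) =====
theorem categorize_gaps_py_spec : Claim_equal_categorize_gaps_py := by
  intro skill_gaps _ _
  unfold Spec_categorize_gaps_py
  simp only [categorize_gaps_py, categorize_gaps_py_alt]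
  rw [categorize_foldl_inv, sorted_rank_eq, count_rank, count_rank]
  set f0 := skill_gaps.filter (fun gap => pvRank gap = 0)
  set f1 := skill_gaps.filter (fun gap => pvRank gap = 1)
  set f2 := skill_gaps.filter (fun gap => pvRank gap = 2)
  have hc : ((f0.length : Int) + (f1.length : Int)) = ((f0.length + f1.length : Nat) : Int) := by push_cast; ring
  rw [hc, PySem.List.slice_to_natCast, PySem.List.slice_natCast, PySem.List.slice_from_natCast]
  simp only [Prod.mk.injEq]
  refine ⟨?_, ?_, ?_⟩
  · simp
  · rw [List.append_assoc, List.drop_left]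
    simp [List.take_left']
  · have ha : f0 ++ f1 ++ f2 = (f0 ++ f1) ++ f2 := by simp
    rw [ha, List.drop_left' (by simp)]
    simp
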